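-- pv_equiv track=rewrite | github.com/eduardofmarcos/Python | 79 - lista_comp_analise_dados.py | my_min_by_weight
-- ===== SOURCE A (Python) =====
-- def my_min_by_weight(sequence):
--     if not sequence:
--         raise ValueError('empty sequence')
--
--     minimum = sequence[0]
--
--     for item in sequence:
--
--         if item[1] < minimum[1]:
--             minimum = item
--
--     return minimum
-- ===== SOURCE B (Python) =====
-- def my_min_by_weight(sequence):
--     if not sequence:
--         raise ValueError('empty sequence')
--     # stable sort keeps the earliest element among equal weights in front
--     return sorted(sequence, key=lambda x: x[1])[0]
-- ===== Notes on version B (the rewrite author's own statement) =====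
-- stated objective: idiomatic
-- what changed: Replaces the manual running-minimum loop with a stable sort by the weight field and taking the first element; sort stability preserves A's first-occurrence tie rule.
import Mathlib
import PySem

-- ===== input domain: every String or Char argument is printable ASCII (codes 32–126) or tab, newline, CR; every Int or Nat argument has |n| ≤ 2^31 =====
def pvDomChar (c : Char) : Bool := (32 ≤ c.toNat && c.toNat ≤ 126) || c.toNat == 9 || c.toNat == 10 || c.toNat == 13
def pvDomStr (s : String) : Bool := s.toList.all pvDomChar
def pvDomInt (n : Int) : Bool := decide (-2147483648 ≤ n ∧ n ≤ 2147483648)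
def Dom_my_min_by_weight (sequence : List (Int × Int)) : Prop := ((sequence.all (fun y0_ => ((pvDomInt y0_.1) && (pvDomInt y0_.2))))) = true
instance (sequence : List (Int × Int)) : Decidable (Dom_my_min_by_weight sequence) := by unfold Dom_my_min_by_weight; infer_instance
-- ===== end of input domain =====

-- B replaces A's running-minimum loop by a stable sort on the weight field and taking the
-- first element; return-value equivalence is proved on nonempty lists (A raises ValueError on []).

-- ===== PORT A =====
-- A: minimum = sequence[0]; for item in sequence: if item[1] < minimum[1]: minimum = item
def my_min_by_weight (sequence : List (Int × Int)) : Int × Int :=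
  match sequence with
  | [] => (0, 0)   -- unreachable under Pre_ (Python raises ValueError here)
  | h :: _ => sequence.foldl (fun minimum item => if item.2 < minimum.2 then item else minimum) h

-- ===== PORT B =====
-- B: sorted(sequence, key=lambda x: x[1])[0]  ([0] on [] would be IndexError; unreachable under Pre_)
def my_min_by_weight_alt (sequence : List (Int × Int)) : Int × Int :=
  (PySem.List.sorted sequence (fun x => x.2)).headD (0, 0)

-- ===== PRECONDITION & SPEC =====
-- Pre_ excludes only the empty list, on which A raises ValueError.
def Pre_my_min_by_weight (sequence : List (Int × Int)) : Prop := sequence ≠ []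
instance (sequence : List (Int × Int)) : Decidable (Pre_my_min_by_weight sequence) := by unfold Pre_my_min_by_weight; infer_instance
def pvWitness_my_min_by_weight : (List (Int × Int)) := [(1, 5), (2, 3), (4, 3)]
def Spec_my_min_by_weight (sequence : List (Int × Int)) (out : Int × Int) : Prop := out = my_min_by_weight_alt sequence
instance (sequence : List (Int × Int)) (out : Int × Int) : Decidable (Spec_my_min_by_weight sequence out) := by unfold Spec_my_min_by_weight; infer_instance

-- ===== CLAIM (what is proved, stated in full; the proofs are below) =====
def Claim_equal_my_min_by_weight : Prop := ∀ (sequence : List (Int × Int)), Dom_my_min_by_weight sequence → Pre_my_min_by_weight sequence → Spec_my_min_by_weight sequence (my_min_by_weight sequence)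

-- ===== LEMMAS AND PROOFS =====

-- The head of the stable insertion-sort accumulator evolves exactly like A's running minimum.
theorem pv_head_foldl_insertBy (xs : List (Int × Int)) (a : Int × Int) (racc : List (Int × Int)) :
    ∃ rest, xs.foldl (fun acc x => PySem.List.insertBy (fun p q => decide (p.2 < q.2)) x acc) (a :: racc)
      = (xs.foldl (fun minimum item => if item.2 < minimum.2 then item else minimum) a) :: rest := by
  induction xs generalizing a racc with
  | nil => exact ⟨racc, rfl⟩
  | cons x xs ih =>
    simp only [List.foldl_cons, PySem.List.insertBy]
    by_cases h : x.2 < a.2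
    · simpa [h] using ih x (a :: racc)
    · simpa [h] using ih a (PySem.List.insertBy (fun p q => decide (p.2 < q.2)) x racc)

-- ===== VERDICT (by name: the statement is the Claim_ definition above) =====
theorem my_min_by_weight_spec : Claim_equal_my_min_by_weight := by
  intro sequence _ hpre
  unfold Spec_my_min_by_weight my_min_by_weight my_min_by_weight_alt
  cases sequence with
  | nil => exact absurd rfl hpre
  | cons h t =>
    rw [PySem.List.sorted_eq_foldl_insertBy]
    simp only [List.foldl_cons, PySem.List.insertBy]
    obtain ⟨rest, hr⟩ := pv_head_foldl_insertBy t h []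
    rw [hr]
    simp
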